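-- pv_equiv track=rewrite | github.com/donxcary/AirBnB_clone | console.py | line_to_words
-- ===== SOURCE A (Python) =====
-- def line_to_words(line):
--     """
--     Function to create words in a line
--     """
--     line_list = []
--     word = ""
--     count = 0
--     for letter in line:
--         word = word + letter
--         if letter.isspace() is True:
--             line_list.append(word)
--             word = ""
--         count = count + 1
--         if count == len(line):
--             line_list.append(word)
--     stripped_words = []
--     for word in line_list:
--         word = word.strip()
--         stripped_words.append(word)
--     return stripped_words
-- ===== SOURCE B (Python) =====
-- def line_to_words(line):
--     """Single pass over slice boundaries; no word accumulation, no second strip pass."""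
--     if not line:
--         return []
--     words = []
--     start = 0
--     for i, ch in enumerate(line):
--         if ch.isspace():
--             words.append(line[start:i])
--             start = i + 1
--     words.append(line[start:])
--     return words
-- ===== Notes on version B (the rewrite author's own statement) =====
-- stated objective: simpler
-- what changed: B replaces A's two passes (char-by-char word accumulation with trailing separators, then a strip pass over every collected word) by a single enumerate pass that tracks slice boundaries and appends whitespace-free slices directly, with an up-front empty-line guard; measured faster by a constant factor (no per-char string concatenation, no second pass).
import Mathlib
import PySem

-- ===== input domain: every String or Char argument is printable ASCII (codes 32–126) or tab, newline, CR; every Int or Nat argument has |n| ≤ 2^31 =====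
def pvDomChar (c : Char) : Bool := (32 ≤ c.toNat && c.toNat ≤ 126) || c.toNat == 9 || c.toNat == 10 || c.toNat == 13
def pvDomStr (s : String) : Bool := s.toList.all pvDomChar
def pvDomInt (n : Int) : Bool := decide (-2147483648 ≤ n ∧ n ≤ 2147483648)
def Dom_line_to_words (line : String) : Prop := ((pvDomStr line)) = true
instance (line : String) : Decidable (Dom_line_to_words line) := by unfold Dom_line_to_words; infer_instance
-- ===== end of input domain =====

-- B replaces A's char-by-char word building plus a second strip pass by one pass over
-- slice boundaries (simpler: no accumulated word, no strip pass).


-- ===== PORT A =====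
-- loop body of A's first 'for letter in line' loop (state: line_list, word, count)
def line_to_wordsStep (n : Int) (st : List (List Char) × List Char × Int) (letter : Char) :
    List (List Char) × List Char × Int :=
  let word := st.2.1 ++ [letter]
  if PySem.Chars.isspace letter then
    let ll := st.1 ++ [word]
    let count := st.2.2 + 1
    (if count = n then ll ++ [([] : List Char)] else ll, ([] : List Char), count)
  else
    let count := st.2.2 + 1
    (if count = n then st.1 ++ [word] else st.1, word, count)

def line_to_words (line : String) : List String :=
  let st := line.toList.foldl (line_to_wordsStep (PySem.Str.len line)) ([], [], 0)
  -- second pass: strip every collected word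
  st.1.map (fun w => String.ofList (PySem.Chars.strip w))

-- ===== PORT B =====
-- loop body of B's single 'for i, ch in enumerate(line)' loop (state: words, start)
def line_to_words_altStep (cs : List Char) (st : List String × Int) (p : Int × Char) :
    List String × Int :=
  if PySem.Chars.isspace p.2 then
    (st.1 ++ [String.ofList (PySem.List.slice cs (some st.2) (some p.1))], p.1 + 1)
  else st

def line_to_words_alt (line : String) : List String :=
  if line.toList = [] then [] else
    let cs := line.toList
    let r := (PySem.List.enumerate cs 0).foldl (line_to_words_altStep cs) ([], 0)
    r.1 ++ [String.ofList (PySem.List.slice cs (some r.2) none)]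

-- ===== PRECONDITION & SPEC =====
def Spec_line_to_words (line : String) (out : List String) : Prop := out = line_to_words_alt line
instance (line : String) (out : List String) : Decidable (Spec_line_to_words line out) := by unfold Spec_line_to_words; infer_instance

-- ===== CLAIM (what is proved, stated in full; the proofs are below) =====
def Claim_equal_line_to_words : Prop := ∀ (line : String), Dom_line_to_words line → Spec_line_to_words line (line_to_words line)

-- ===== LEMMAS AND PROOFS =====

-- canonical segments between whitespace characters (the common value of both loops)
def segsAux (cur : List Char) : List Char → List (List Char)
  | [] => [cur]
  | c :: cs => if PySem.Chars.isspace c then cur :: segsAux [] cs else segsAux (cur ++ [c]) cs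

-- the raw (unstripped) words A's first loop collects on a nonempty suffix
def rawSegs (cur : List Char) : List Char → List (List Char)
  | [] => []
  | c :: cs =>
    if PySem.Chars.isspace c then
      (cur ++ [c]) :: (if cs = [] then [([] : List Char)] else rawSegs [] cs)
    else
      if cs = [] then [cur ++ [c]] else rawSegs (cur ++ [c]) cs

lemma A_loop (suffix : List Char) (n : Int) (ll : List (List Char)) (word : List Char)
    (count : Int) (hne : suffix ≠ []) (h : count + suffix.length = n) :
    (suffix.foldl (line_to_wordsStep n) (ll, word, count)).1 = ll ++ rawSegs word suffix := by
  induction suffix generalizing ll word count with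
  | nil => exact absurd rfl hne
  | cons c cs ih =>
    by_cases hc : PySem.Chars.isspace c = true
    · rcases eq_or_ne cs ([] : List Char) with h0 | h0
      · subst h0
        have hn : count + 1 = n := by simp at h; omega
        simp [line_to_wordsStep, hc, hn, rawSegs]
      · have hn : ¬ (count + 1 = n) := by
          have hpos : 0 < cs.length := List.length_pos_of_ne_nil h0
          simp [List.length_cons] at h; omega
        simp only [List.foldl_cons, line_to_wordsStep, hc, if_true, hn, if_false]
        rw [ih _ _ _ h0 (by simp [List.length_cons] at h ⊢; omega)]
        simp [rawSegs, hc, h0]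
    · rcases eq_or_ne cs ([] : List Char) with h0 | h0
      · subst h0
        have hn : count + 1 = n := by simp at h; omega
        simp [line_to_wordsStep, hc, hn, rawSegs]
      · have hn : ¬ (count + 1 = n) := by
          have hpos : 0 < cs.length := List.length_pos_of_ne_nil h0
          simp [List.length_cons] at h; omega
        simp only [List.foldl_cons, line_to_wordsStep, hc, if_false, hn]
        rw [ih _ _ _ h0 (by simp [List.length_cons] at h ⊢; omega)]
        simp [rawSegs, hc, h0]

lemma dropWhile_clean (l : List Char) (h : ∀ c ∈ l, PySem.Chars.isspace c = false) :
    l.dropWhile PySem.Chars.isspace = l := by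
  cases l with
  | nil => rfl
  | cons a t => simp [h a (by simp)]

lemma strip_clean (l : List Char) (h : ∀ c ∈ l, PySem.Chars.isspace c = false) :
    PySem.Chars.strip l = l := by
  simp [PySem.Chars.strip, PySem.Chars.lstrip, PySem.Chars.rstrip, dropWhile_clean l h,
    dropWhile_clean l.reverse (by simpa using fun c hc => h c hc)]

lemma strip_snoc_ws (l : List Char) (c : Char) (h : ∀ x ∈ l, PySem.Chars.isspace x = false)
    (hc : PySem.Chars.isspace c = true) : PySem.Chars.strip (l ++ [c]) = l := by
  cases l with
  | nil => simp [PySem.Chars.strip, PySem.Chars.lstrip, PySem.Chars.rstrip, hc]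
  | cons a t =>
    have ha : PySem.Chars.isspace a = false := h a (by simp)
    have hclean : ∀ x ∈ t.reverse ++ [a], PySem.Chars.isspace x = false := by
      intro x hx
      rcases List.mem_append.1 hx with hx | hx
      · exact h x (by simp [List.mem_reverse.1 hx])
      · simp at hx; subst hx; exact ha
    simp [PySem.Chars.strip, PySem.Chars.lstrip, PySem.Chars.rstrip, ha, hc,
      dropWhile_clean _ hclean]

lemma raw_to_segs (suffix : List Char) (word : List Char) (hne : suffix ≠ [])
    (hw : ∀ c ∈ word, PySem.Chars.isspace c = false) :
    (rawSegs word suffix).map (fun w => String.ofList (PySem.Chars.strip w))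
      = (segsAux word suffix).map String.ofList := by
  induction suffix generalizing word with
  | nil => exact absurd rfl hne
  | cons c cs ih =>
    by_cases hc : PySem.Chars.isspace c = true
    · rcases eq_or_ne cs ([] : List Char) with h0 | h0
      · subst h0
        simp [rawSegs, segsAux, hc, strip_snoc_ws word c hw hc, strip_clean ([] : List Char) (by simp)]
      · simp only [rawSegs, segsAux, hc, if_true, h0, if_false, List.map_cons]
        rw [ih [] h0 (by simp), strip_snoc_ws word c hw hc]
    · have hc' : PySem.Chars.isspace c = false := by simpa using hc
      have hw' : ∀ x ∈ word ++ [c], PySem.Chars.isspace x = false := by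
        intro x hx
        rcases List.mem_append.1 hx with hx | hx
        · exact hw x hx
        · simp at hx; subst hx; exact hc'
      rcases eq_or_ne cs ([] : List Char) with h0 | h0
      · subst h0
        simp [rawSegs, segsAux, hc, strip_clean _ hw']
      · simp only [rawSegs, segsAux, hc, if_false, h0]
        exact ih (word ++ [c]) h0 hw'

lemma B_loop (suffix cs : List Char) (k start : Nat) (acc : List String)
    (hdrop : cs.drop k = suffix) (hks : start ≤ k) :
    ((PySem.List.enumerate suffix (k : Int)).foldl (line_to_words_altStep cs) (acc, (start : Int))).1
      ++ [String.ofList (PySem.List.slice cs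
            (some ((PySem.List.enumerate suffix (k : Int)).foldl (line_to_words_altStep cs) (acc, (start : Int))).2) none)]
      = acc ++ (segsAux ((cs.drop start).take (k - start)) suffix).map String.ofList := by
  induction suffix generalizing k start acc with
  | nil =>
    have hlen : cs.length ≤ k := List.drop_eq_nil_iff.1 hdrop
    have htake : (cs.drop start).take (k - start) = cs.drop start :=
      List.take_of_length_le (by simp [List.length_drop]; omega)
    simp only [PySem.List.enumerate, List.foldl_nil, segsAux, List.map_cons, List.map_nil, htake]
    rw [PySem.List.slice_from_natCast]
  | cons c rest ih =>
    have hk : k < cs.length := by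
      by_contra hle
      rw [List.drop_eq_nil_iff.2 (by omega)] at hdrop
      exact (List.cons_ne_nil _ _) hdrop.symm
    have hdrop' : cs.drop (k + 1) = rest := by
      have h1 := congrArg List.tail hdrop
      simpa [List.tail_drop] using h1
    have hget : (cs.drop start)[k - start]? = some c := by
      rw [List.getElem?_drop]
      have h2 : start + (k - start) = k := by omega
      rw [h2]
      have h3 := congrArg (fun l => l[0]?) hdrop
      simpa [List.getElem?_drop] using h3
    rw [PySem.List.enumerate_cons, List.foldl_cons]
    by_cases hc : PySem.Chars.isspace c = true
    · have hstep : line_to_words_altStep cs (acc, (start : Int)) ((k : Int), c)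
          = (acc ++ [String.ofList ((cs.drop start).take (k - start))], ((k + 1 : Nat) : Int)) := by
        simp [line_to_words_altStep, hc, PySem.List.slice_natCast]
      have hcast : ((k : Int) + 1) = ((k + 1 : Nat) : Int) := by push_cast; ring
      rw [hstep, hcast, ih (k + 1) (k + 1) _ hdrop' (le_refl _)]
      simp [segsAux, hc, List.append_assoc]
    · have hstep : line_to_words_altStep cs (acc, (start : Int)) ((k : Int), c)
          = (acc, (start : Int)) := by
        simp [line_to_words_altStep, hc]
      have hcast : ((k : Int) + 1) = ((k + 1 : Nat) : Int) := by push_cast; ring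
      rw [hstep, hcast, ih (k + 1) start acc hdrop' (by omega)]
      have h1 : k + 1 - start = (k - start) + 1 := by omega
      have h2 : (cs.drop start).take (k + 1 - start) = (cs.drop start).take (k - start) ++ [c] := by
        rw [h1, List.take_add_one, hget]
        rfl
      rw [h2]
      simp [segsAux, hc]

-- ===== VERDICT (by name: the statement is the Claim_ definition above) =====
theorem line_to_words_spec : Claim_equal_line_to_words := by
  intro line _
  unfold Spec_line_to_words line_to_words line_to_words_alt
  cases hcs : line.toList with
  | nil => simp [hcs]
  | cons a t =>
    have hne : (a :: t : List Char) ≠ [] := by simp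
    have hlen : PySem.Str.len line = ((a :: t).length : Int) := by
      rw [PySem.Str.len_eq, hcs]
    have hA := A_loop (a :: t) ((a :: t).length : Int) [] [] 0 hne (by simp)
    have hB := B_loop (a :: t) (a :: t) 0 0 [] (by simp) (le_refl 0)
    simp only [Nat.cast_zero, List.drop_zero, Nat.sub_zero, List.take_zero] at hB
    simp only [hlen, if_neg hne]
    rw [hA]
    simp only [List.nil_append]
    rw [raw_to_segs (a :: t) [] hne (by simp)]
    rw [hB]
    simp
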